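-- pv_equiv track=rewrite | github.com/mehmetecebsnss/OKWIS | trendler_baglam.py | _filtrele_ve_sirala
-- ===== SOURCE A (Python) =====
-- _TREND_ANAHTAR = [
--     # Teknoloji trendleri
--     "ai", "artificial intelligence", "chatgpt", "openai", "robot", "automation",
--     "crypto", "bitcoin", "blockchain", "metaverse", "vr", "ar",
--     # Sosyal trendler
--     "viral", "trending", "social media", "tiktok", "instagram", "youtube",
--     "protest", "movement", "generation", "youth", "culture",
--     # Ekonomik trendler
--     "inflation", "recession", "growth", "unemployment", "housing",
--     "remote work", "gig economy", "startup",
--     # Çevre/iklim trendleri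
--     "climate", "green", "sustainable", "carbon", "electric",
--     # Sağlık trendleri
--     "pandemic", "vaccine", "mental health", "wellness",
--     # Türkçe
--     "trend", "viral", "sosyal medya", "yapay zeka", "kripto",
-- ]
--
-- def _filtrele_ve_sirala(titles: list[str]) -> tuple[list[str], list[str]]:
--     """Başlıkları trend-ilgili ve genel olarak ikiye ayır."""
--     ilgili: list[str] = []
--     genel: list[str] = []
--     for t in titles:
--         t_lower = t.lower()
--         if any(k in t_lower for k in _TREND_ANAHTAR):
--             ilgili.append(t)
--         else:
--             genel.append(t)
--     return ilgili, genel
-- ===== SOURCE B (Python) =====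
-- _TREND_ANAHTAR = [
--     # Teknoloji trendleri
--     "ai", "artificial intelligence", "chatgpt", "openai", "robot", "automation",
--     "crypto", "bitcoin", "blockchain", "metaverse", "vr", "ar",
--     # Sosyal trendler
--     "viral", "trending", "social media", "tiktok", "instagram", "youtube",
--     "protest", "movement", "generation", "youth", "culture",
--     # Ekonomik trendler
--     "inflation", "recession", "growth", "unemployment", "housing",
--     "remote work", "gig economy", "startup",
--     # Çevre/iklim trendleri
--     "climate", "green", "sustainable", "carbon", "electric",
--     # Sağlık trendleri
--     "pandemic", "vaccine", "mental health", "wellness",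
--     # Türkçe
--     "trend", "viral", "sosyal medya", "yapay zeka", "kripto",
-- ]
--
--
-- _BY_FIRST: dict[str, tuple[str, ...]] = {}
-- for _k in _TREND_ANAHTAR:
--     _BY_FIRST[_k[0]] = _BY_FIRST.get(_k[0], ()) + (_k,)
--
--
-- def _trendli(s: str) -> bool:
--     """One left-to-right sweep over the string: at each position look up, by the
--     character there, which keywords could start there, and prefix-test only those."""
--     for i, c in enumerate(s):
--         ks = _BY_FIRST.get(c)
--         if ks and s.startswith(ks, i):
--             return True
--     return False
--
--
-- def _filtrele_ve_sirala(titles: list[str]) -> tuple[list[str], list[str]]: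
--     flags = [_trendli(t.lower()) for t in titles]
--     ilgili = [t for t, f in zip(titles, flags) if f]
--     genel = [t for t, f in zip(titles, flags) if not f]
--     return ilgili, genel
-- ===== Notes on version B (the rewrite author's own statement) =====
-- stated objective: faster
-- what changed: Replaces the keyword-major 'any(k in t_lower)' 45 substring searches per title and the single two-accumulator loop by a position-major scan that, at each character, looks up in a precomputed first-character dict which keywords could start there and prefix-tests only those (stopping at the first hit), plus a flags list and two zip-comprehension passes that build the partition.
import Mathlib
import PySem

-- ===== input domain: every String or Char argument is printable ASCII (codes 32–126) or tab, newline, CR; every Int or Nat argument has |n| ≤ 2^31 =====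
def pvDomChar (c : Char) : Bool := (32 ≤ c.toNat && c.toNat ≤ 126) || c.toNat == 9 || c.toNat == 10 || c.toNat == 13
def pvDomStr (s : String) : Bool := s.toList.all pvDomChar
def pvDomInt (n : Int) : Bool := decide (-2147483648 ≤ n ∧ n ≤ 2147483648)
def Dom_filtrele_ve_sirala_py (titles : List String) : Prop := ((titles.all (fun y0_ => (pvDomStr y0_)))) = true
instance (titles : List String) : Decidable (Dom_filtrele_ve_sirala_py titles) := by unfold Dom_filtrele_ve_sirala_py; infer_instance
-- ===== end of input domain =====

-- B differs by algorithm: a position-major scan dispatching through a first-character dict of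
-- keywords (+ flags/zip partition) instead of keyword-major substring tests in one accumulator
-- loop; a timing run measured B faster on its generated inputs.

-- shared module constant _TREND_ANAHTAR
def trendKeys : List String := [
    "ai", "artificial intelligence", "chatgpt", "openai", "robot", "automation",
    "crypto", "bitcoin", "blockchain", "metaverse", "vr", "ar",
    "viral", "trending", "social media", "tiktok", "instagram", "youtube",
    "protest", "movement", "generation", "youth", "culture",
    "inflation", "recession", "growth", "unemployment", "housing",
    "remote work", "gig economy", "startup",
    "climate", "green", "sustainable", "carbon", "electric",
    "pandemic", "vaccine", "mental health", "wellness",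
    "trend", "viral", "sosyal medya", "yapay zeka", "kripto"]

-- ===== PORT A =====
def filtrele_ve_sirala_py (titles : List String) : List String × List String :=
  titles.foldl
    (fun (acc : List String × List String) t =>
      let t_lower := PySem.Str.lower t
      if trendKeys.any (fun k => PySem.Str.isIn k t_lower) then (acc.1 ++ [t], acc.2)
      else (acc.1, acc.2 ++ [t]))
    ([], [])

-- ===== PORT B =====
-- Source B's module-level build of _BY_FIRST: group the keywords by first character
-- (k[0] cannot raise: every keyword is nonempty, so the [] branch is unreachable)
def byFirst : PySem.Dict Char (List String) :=
  trendKeys.foldl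
    (fun d k =>
      match k.toList with
      | [] => d
      | c :: _ => d.insert c (d.getD c [] ++ [k]))
    PySem.Dict.empty

-- Source B's _trendli: for i, c in enumerate(s): ks = _BY_FIRST.get(c); if ks and s.startswith(ks, i) …
-- ('ks and s.startswith(ks, i)' = some keyword of ks is a prefix of s[i:]; i ≥ 0 from enumerate)
def trendliB (s : List Char) : Bool :=
  (PySem.List.enumerate s).any (fun p =>
    match byFirst.get? p.2 with
    | none => false
    | some ks => ks.any (fun k => PySem.Chars.startswith (s.drop p.1.toNat) k.toList))

def filtrele_ve_sirala_py_alt (titles : List String) : List String × List String :=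
  let flags := titles.map (fun t => trendliB (PySem.Str.lower t).toList)
  (((titles.zip flags).filter (fun p => p.2)).map (fun p => p.1),
   ((titles.zip flags).filter (fun p => !p.2)).map (fun p => p.1))

-- ===== PRECONDITION & SPEC =====
def Spec_filtrele_ve_sirala_py (titles : List String) (out : List String × List String) : Prop := out = filtrele_ve_sirala_py_alt titles
instance (titles : List String) (out : List String × List String) : Decidable (Spec_filtrele_ve_sirala_py titles out) := by unfold Spec_filtrele_ve_sirala_py; infer_instance

-- ===== CLAIM (what is proved, stated in full; the proofs are below) =====
def Claim_equal_filtrele_ve_sirala_py : Prop := ∀ (titles : List String), Dom_filtrele_ve_sirala_py titles → Spec_filtrele_ve_sirala_py titles (filtrele_ve_sirala_py titles)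

-- ===== LEMMAS AND PROOFS =====

lemma trendKeys_ne_nil : ∀ k ∈ trendKeys, k.toList ≠ [] := by decide

-- the grouping fold: k is in the bucket of c iff k is a listed keyword whose first char is c
lemma mem_groupFold (L : List String) (d : PySem.Dict Char (List String)) (c : Char) (k : String) :
    k ∈ (L.foldl
          (fun d k =>
            match k.toList with
            | [] => d
            | c' :: _ => d.insert c' (d.getD c' [] ++ [k]))
          d).getD c []
      ↔ k ∈ d.getD c [] ∨ (k ∈ L ∧ k.toList.head? = some c) := by
  induction L generalizing d with
  | nil => simp
  | cons x L ih =>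
    rw [List.foldl_cons]
    cases hx : x.toList with
    | nil =>
      rw [ih]
      constructor
      · rintro (h | h)
        · exact Or.inl h
        · exact Or.inr ⟨List.mem_cons_of_mem _ h.1, h.2⟩
      · rintro (h | ⟨hmem, hhd⟩)
        · exact Or.inl h
        · rcases List.mem_cons.mp hmem with rfl | hm
          · rw [hx] at hhd; simp at hhd
          · exact Or.inr ⟨hm, hhd⟩
    | cons c' rest =>
      rw [ih, PySem.Dict.getD_insert]
      by_cases hc : c = c'
      · subst hc
        rw [if_pos rfl]
        simp only [List.mem_append, List.mem_cons, List.not_mem_nil, or_false]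
        constructor
        · rintro ((h | rfl) | h)
          · exact Or.inl h
          · exact Or.inr ⟨Or.inl rfl, by rw [hx]; rfl⟩
          · exact Or.inr ⟨Or.inr h.1, h.2⟩
        · rintro (h | ⟨rfl | hm, hhd⟩)
          · exact Or.inl (Or.inl h)
          · exact Or.inl (Or.inr rfl)
          · exact Or.inr ⟨hm, hhd⟩
      · rw [if_neg hc]
        constructor
        · rintro (h | h)
          · exact Or.inl h
          · exact Or.inr ⟨List.mem_cons_of_mem _ h.1, h.2⟩
        · rintro (h | ⟨hmem, hhd⟩)
          · exact Or.inl h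
          · rcases List.mem_cons.mp hmem with rfl | hm
            · rw [hx] at hhd; simp at hhd; exact absurd hhd.symm hc
            · exact Or.inr ⟨hm, hhd⟩

lemma mem_byFirst (c : Char) (k : String) :
    k ∈ byFirst.getD c [] ↔ k ∈ trendKeys ∧ k.toList.head? = some c := by
  rw [byFirst, mem_groupFold]
  simp [PySem.Dict.getD_empty]

-- at a position whose character is c, testing only c's bucket tests all keywords
lemma dispatch_eq (s : List Char) (i : Nat) (c : Char) (h : s[i]? = some c) :
    (match byFirst.get? c with
     | none => false
     | some ks => ks.any (fun k => PySem.Chars.startswith (s.drop i) k.toList))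
      = trendKeys.any (fun k => PySem.Chars.startswith (s.drop i) k.toList) := by
  have hbucket : (match byFirst.get? c with
      | none => false
      | some ks => ks.any (fun k => PySem.Chars.startswith (s.drop i) k.toList))
      = (byFirst.getD c []).any (fun k => PySem.Chars.startswith (s.drop i) k.toList) := by
    rcases hks : byFirst.get? c with _ | ks
    · rw [PySem.Dict.getD_eq_get?_getD, hks]; rfl
    · rw [PySem.Dict.getD_eq_get?_getD, hks]; rfl
  rw [hbucket, Bool.eq_iff_iff]
  simp only [List.any_eq_true, PySem.Chars.startswith_iff]
  constructor
  · rintro ⟨k, hk, hpre⟩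
    exact ⟨k, (mem_byFirst c k).mp hk |>.1, hpre⟩
  · rintro ⟨k, hk, hpre⟩
    refine ⟨k, (mem_byFirst c k).mpr ⟨hk, ?_⟩, hpre⟩
    rcases hpre with ⟨t, ht⟩
    have hhd : (s.drop i).head? = some c := by
      rw [List.head?_drop]; exact h
    rw [← ht] at hhd
    cases hkl : k.toList with
    | nil => exact absurd hkl (trendKeys_ne_nil k hk)
    | cons c0 r => rw [hkl] at hhd; simp at hhd; simp [hhd]

-- Source B's enumerate scan is the plain position scan
lemma trendliB_eq_scan (s : List Char) :
    trendliB s = (List.range s.length).any (fun i =>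
      trendKeys.any (fun k => PySem.Chars.startswith (s.drop i) k.toList)) := by
  rw [Bool.eq_iff_iff]
  simp only [trendliB, List.any_eq_true, List.mem_range, PySem.List.mem_enumerate_iff]
  constructor
  · rintro ⟨p, ⟨j, hj, rfl⟩, hp⟩
    refine ⟨j, hj, ?_⟩
    have e : ((0 : Int) + (j : Int)).toNat = j := by omega
    simp only [e] at hp
    have h2 : (trendKeys.any fun k => PySem.Chars.startswith (s.drop j) k.toList) = true := by
      rw [← dispatch_eq s j s[j] (List.getElem?_eq_getElem hj)]; exact hp
    simpa using h2
  · rintro ⟨j, hj, hp⟩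
    refine ⟨((0 : Int) + (j : Int), s[j]), ⟨j, hj, rfl⟩, ?_⟩
    have e : ((0 : Int) + (j : Int)).toNat = j := by omega
    simp only [e]
    rw [dispatch_eq s j s[j] (List.getElem?_eq_getElem hj)]
    simpa using hp

-- 'some keyword is a substring of s' ↔ 'some keyword starts at some position of s'
lemma any_isIn_eq_trendliB (s : List Char) :
    (trendKeys.any fun k => PySem.Chars.isIn k.toList s) = trendliB s := by
  rw [trendliB_eq_scan]
  rw [Bool.eq_iff_iff]
  simp only [List.any_eq_true, List.mem_range,
    PySem.Chars.isIn_iff_infix, PySem.Chars.startswith_iff]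
  constructor
  · rintro ⟨k, hk, hinf⟩
    rcases List.infix_iff_prefix_suffix.mp hinf with ⟨t, hpre, hsuf⟩
    have ht : t ≠ [] := by
      rintro rfl
      exact trendKeys_ne_nil k hk (List.prefix_nil.mp hpre)
    have hle : t.length ≤ s.length := hsuf.length_le
    have hdrop : s.drop (s.length - t.length) = t := by
      rcases hsuf with ⟨u, rfl⟩
      simp
    refine ⟨s.length - t.length, ?_, k, hk, ?_⟩
    · have : 0 < t.length := List.length_pos_iff.mpr ht
      omega
    · rw [hdrop]; exact hpre
  · rintro ⟨i, _, k, hk, hpre⟩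
    exact ⟨k, hk, hpre.isInfix.trans (List.drop_suffix i s).isInfix⟩

-- A's loop with two accumulators is the pair of filters
lemma foldl_part (p : String → Bool) (ts : List String) (a b : List String) :
    ts.foldl (fun (acc : List String × List String) t =>
        if p t then (acc.1 ++ [t], acc.2) else (acc.1, acc.2 ++ [t])) (a, b)
      = (a ++ ts.filter p, b ++ ts.filter (fun t => !p t)) := by
  induction ts generalizing a b with
  | nil => simp
  | cons t ts ih =>
    by_cases h : p t <;> simp [h, ih]

-- B's zip-with-flags comprehensions are filters
lemma zip_flags_filter_pos (f : String → Bool) (ts : List String) :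
    (((ts.zip (ts.map f)).filter (fun p => p.2)).map (fun p => p.1))
      = ts.filter f := by
  induction ts with
  | nil => simp
  | cons t ts ih =>
    by_cases h : f t <;> simp [h, ih]

lemma zip_flags_filter_neg (f : String → Bool) (ts : List String) :
    (((ts.zip (ts.map f)).filter (fun p => !p.2)).map (fun p => p.1))
      = ts.filter (fun t => !f t) := by
  induction ts with
  | nil => simp
  | cons t ts ih =>
    by_cases h : f t <;> simp [h, ih]

-- ===== VERDICT (by name: the statement is the Claim_ definition above) =====
theorem filtrele_ve_sirala_py_spec : Claim_equal_filtrele_ve_sirala_py := by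
  intro titles _
  unfold Spec_filtrele_ve_sirala_py filtrele_ve_sirala_py filtrele_ve_sirala_py_alt
  rw [foldl_part (fun t => trendKeys.any fun k => PySem.Str.isIn k (PySem.Str.lower t))]
  simp only [List.nil_append, zip_flags_filter_pos, zip_flags_filter_neg]
  exact Prod.ext (List.filter_congr fun t _ => by simp [any_isIn_eq_trendliB])
    (List.filter_congr fun t _ => by simp [any_isIn_eq_trendliB])
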